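-- pv_equiv track=rewrite | github.com/manwar/perlweeklychallenge-club | challenge-270/pokgopun/python/ch-1.py | cntSP
-- ===== SOURCE A (Python) =====
-- def isAllZero(lst):
--     for i in lst:
--         if i!=0:
--             return False
--     return True
--
-- def cntSP(mn: list):
--     m = len(mn)
--     n = len(mn[0])
--     c = 0
--     for i in range(m):
--         for j in range(n):
--             if mn[i][j] != 1:
--                 continue
--             if isAllZero((mn[x][j] for x in range(m) if x!=i)) == False:
--                 continue
--             if isAllZero((mn[i][x] for x in range(n) if x!=j)) == False:
--                 continue
--             c += 1
--     return c
-- ===== SOURCE B (Python) =====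
-- def cntSP(mn: list):
--     row_nz = [len(row) - row.count(0) for row in mn]
--     if 1 not in row_nz:
--         return 0
--     col_nz = [len(col) - col.count(0) for col in zip(*mn)]
--     return sum(1 for rnz, row in zip(row_nz, mn) if rnz == 1
--                  for j, v in enumerate(row) if v == 1 and col_nz[j] == 1)
-- ===== Notes on version B (the rewrite author's own statement) =====
-- stated objective: alternative
-- what changed: Precompute per-row and per-column nonzero counts once (list.count and a zip transpose, with an early exit when no row has exactly one nonzero) and count cells equal to 1 whose row and column counts are both 1, instead of A's per-cell rescans of the whole row and column; Pre_ restricts to nonempty rectangular matrices: A raises IndexError on empty input or rows shorter than the first, and on rows longer than the first it silently ignores entries beyond column len(mn[0]), an artefact of scanning range(len(mn[0])).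
-- outside the precondition, e.g. on cntSP([[1, 0], [0, 1, 1]]): A returns 2, B returns 1
import Mathlib
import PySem

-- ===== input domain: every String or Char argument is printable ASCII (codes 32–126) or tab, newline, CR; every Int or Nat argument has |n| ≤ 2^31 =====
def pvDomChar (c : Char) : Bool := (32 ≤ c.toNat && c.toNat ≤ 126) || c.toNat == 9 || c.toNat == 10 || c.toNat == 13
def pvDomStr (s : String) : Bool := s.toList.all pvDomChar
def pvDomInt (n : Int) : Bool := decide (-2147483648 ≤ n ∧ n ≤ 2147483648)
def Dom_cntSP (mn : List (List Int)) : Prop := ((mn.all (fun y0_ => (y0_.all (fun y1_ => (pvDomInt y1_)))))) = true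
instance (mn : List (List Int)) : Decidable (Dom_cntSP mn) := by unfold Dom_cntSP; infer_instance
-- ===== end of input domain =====

-- B precomputes the per-row and per-column nonzero counts once (early exit when
-- no row has exactly one nonzero) and counts cells equal to 1 whose row and
-- column counts are both 1, instead of A's per-cell rescans of row and column;
-- proved equal to A on nonempty rectangular matrices (Pre_).

-- ===== PORT A =====
def isAllZeroA : List Int → Bool
  | [] => true
  | i :: rest => if i ≠ 0 then false else isAllZeroA rest

def cntSP (mn : List (List Int)) : Int :=
  let m : Int := mn.length
  let n : Int := (PySem.List.pyGetD mn 0 []).length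
  (PySem.List.pyRange 0 m 1).foldl (fun c i =>
    (PySem.List.pyRange 0 n 1).foldl (fun c j =>
      if PySem.List.pyGetD (PySem.List.pyGetD mn i []) j 0 ≠ 1 then c
      else if isAllZeroA (((PySem.List.pyRange 0 m 1).filter (fun x => x ≠ i)).map
             (fun x => PySem.List.pyGetD (PySem.List.pyGetD mn x []) j 0)) = false then c
      else if isAllZeroA (((PySem.List.pyRange 0 n 1).filter (fun x => x ≠ j)).map
             (fun x => PySem.List.pyGetD (PySem.List.pyGetD mn i []) x 0)) = false then c
      else c + 1) c) 0

-- ===== PORT B =====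
-- hand port of Python's zip(*mn): columns up to the shortest row (exact: every
-- index used is below every row's length)
def pyZipStar (mn : List (List Int)) : List (List Int) :=
  match mn with
  | [] => []
  | r :: rs => (List.range ((r :: rs).foldl (fun a q => min a q.length) r.length)).map
      (fun j => (r :: rs).map (fun q => q.getD j 0))

def cntSP_alt (mn : List (List Int)) : Int :=
  let row_nz : List Int := mn.map (fun row => (row.length : Int) - (row.count 0 : Int))
  if (1 : Int) ∈ row_nz then
    let col_nz : List Int := (pyZipStar mn).map (fun col => (col.length : Int) - (col.count 0 : Int))
    (row_nz.zip mn).foldl (fun c p =>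
      if p.1 == 1 then
        c + ((PySem.List.enumerate p.2 0).countP (fun q =>
              q.2 == 1 && PySem.List.pyGetD col_nz q.1 0 == 1) : Int)
      else c) 0
  else 0

-- ===== PRECONDITION & SPEC =====
-- Pre_ restricts to nonempty rectangular matrices: A raises IndexError on empty mn
-- (mn[0]) and on rows shorter than the first (mn[i][j]); on rows longer than the
-- first, A returns but silently ignores entries beyond column len(mn[0]) — an
-- accidental artefact of scanning range(len(mn[0])), so ragged input is excluded.
def Pre_cntSP (mn : List (List Int)) : Prop :=
  mn ≠ [] ∧ ∀ row ∈ mn, row.length = (PySem.List.pyGetD mn 0 ([] : List Int)).length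
instance (mn : List (List Int)) : Decidable (Pre_cntSP mn) := by unfold Pre_cntSP; infer_instance

def pvWitness_cntSP : List (List Int) := [[1, 0, 2], [0, 1, 0], [0, 0, 0]]

def Spec_cntSP (mn : List (List Int)) (out : Int) : Prop := out = cntSP_alt mn
instance (mn : List (List Int)) (out : Int) : Decidable (Spec_cntSP mn out) := by unfold Spec_cntSP; infer_instance

-- ===== CLAIM (what is proved, stated in full; the proofs are below) =====
def Claim_equal_cntSP : Prop := ∀ (mn : List (List Int)), Dom_cntSP mn → Pre_cntSP mn → Spec_cntSP mn (cntSP mn)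

-- ===== LEMMAS AND PROOFS =====
-- proof-only helper: A's per-cell success condition, stated row-locally
def pvCond (mn : List (List Int)) (n : Nat) (row : List Int) (j : Int) : Bool :=
  decide (0 ≤ j) && decide (j < (n : Int)) && (row.getD j.toNat 0 == 1)
  && decide (∀ x < n, x ≠ j.toNat → row.getD x 0 = 0)
  && (mn.countP (fun q => q.getD j.toNat 0 != 0) == 1)

theorem isAllZeroA_iff (l : List Int) : isAllZeroA l = true ↔ ∀ v ∈ l, v = 0 := by
  induction l with
  | nil => simp [isAllZeroA]
  | cons a t ih => by_cases h : a = 0 <;> simp [isAllZeroA, h, ih]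

theorem countP_eq_one_iff {α : Type} (l : List α) (p : α → Bool) (d : α) (k : Nat)
    (hk : k < l.length) (hp : p (l.getD k d) = true) :
    (l.countP p = 1 ↔ ∀ x < l.length, x ≠ k → p (l.getD x d) = false) := by
  induction l generalizing k with
  | nil => simp at hk
  | cons a t ih =>
    have hmemD : ∀ x, x < t.length → t.getD x d ∈ t := by
      intro x hx
      rw [List.getD_eq_getElem?_getD, List.getElem?_eq_getElem hx]
      exact List.getElem_mem hx
    cases k with
    | zero =>
      simp only [List.getD_cons_zero] at hp
      rw [List.countP_cons, if_pos hp]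
      constructor
      · intro h x hx hxne
        have ht : t.countP p = 0 := by omega
        match x, hxne with
        | x'+1, _ =>
          simp only [List.getD_cons_succ]
          have := List.countP_eq_zero.mp ht (t.getD x' d) (hmemD x' (by simpa using hx))
          simpa using this
      · intro h
        have : t.countP p = 0 := by
          rw [List.countP_eq_zero]
          intro v hv
          obtain ⟨x', hx', rfl⟩ := List.mem_iff_getElem.mp hv
          have := h (x'+1) (by simpa using hx') (by omega)
          simp only [List.getD_cons_succ] at this
          rw [List.getD_eq_getElem?_getD, List.getElem?_eq_getElem hx'] at this
          simp_all
        omega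
    | succ k' =>
      simp only [List.getD_cons_succ] at hp
      have hk' : k' < t.length := by simpa using hk
      have hpos : t.countP p ≠ 0 := by
        simp [List.countP_eq_zero]
        exact ⟨t.getD k' d, hmemD k' hk', hp⟩
      by_cases ha : p a = true
      · rw [List.countP_cons, if_pos ha]
        constructor
        · intro h; omega
        · intro h
          have := h 0 (by simp) (by omega)
          simp [ha] at this
      · rw [List.countP_cons, if_neg ha, add_zero]
        rw [ih k' hk' hp]
        constructor
        · intro h x hx hxne
          cases x with
          | zero => simpa using ha
          | succ x' =>
            simp only [List.getD_cons_succ]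
            exact h x' (by simpa using hx) (by omega)
        · intro h x hx hxne
          have := h (x+1) (by simpa using hx) (by omega)
          simpa using this

theorem allZero_others_iff (G : Int → Int) (n k : Nat) :
    (isAllZeroA (((PySem.List.pyRange 0 (n:Int) 1).filter (fun x => x ≠ (k:Int))).map G) = true)
    ↔ (∀ x < n, x ≠ k → G x = 0) := by
  rw [isAllZeroA_iff]
  constructor
  · intro h x hx hxk
    apply h (G x)
    simp only [List.mem_map, List.mem_filter]
    refine ⟨(x:Int), ⟨⟨?_, ?_⟩, rfl⟩⟩
    · rw [PySem.List.mem_pyRange_one]; omega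
    · simp; omega
  · intro h v hv
    simp only [List.mem_map, List.mem_filter, PySem.List.mem_pyRange_one] at hv
    obtain ⟨x, ⟨⟨hx0, hxn⟩, hxk⟩, rfl⟩ := hv
    rw [(Int.toNat_of_nonneg hx0).symm]
    apply h x.toNat (by omega)
    intro hh; simp at hxk; omega

-- per-cell condition of A rewritten row-locally (given the cell is in range)
theorem cellA_eq (mn : List (List Int)) (n : Nat) (hn : n = (PySem.List.pyGetD mn 0 []).length)
    (c : Int) (i j : Int) (hi0 : 0 ≤ i) (him : i < (mn.length : Int)) (hj0 : 0 ≤ j) (hjn : j < (n : Int)) :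
    (if PySem.List.pyGetD (PySem.List.pyGetD mn i []) j 0 ≠ 1 then c
      else if isAllZeroA (((PySem.List.pyRange 0 (mn.length : Int) 1).filter (fun x => x ≠ i)).map
             (fun x => PySem.List.pyGetD (PySem.List.pyGetD mn x []) j 0)) = false then c
      else if isAllZeroA (((PySem.List.pyRange 0 (n : Int) 1).filter (fun x => x ≠ j)).map
             (fun x => PySem.List.pyGetD (PySem.List.pyGetD mn i []) x 0)) = false then c
      else c + 1)
    = (if pvCond mn n (PySem.List.pyGetD mn i []) j = true then c + 1 else c) := by
  rw [(Int.toNat_of_nonneg hi0).symm, (Int.toNat_of_nonneg hj0).symm]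
  set i' : Nat := i.toNat with hi'
  set j' : Nat := j.toNat with hj'
  have him' : i' < mn.length := by omega
  have hjn' : j' < n := by omega
  simp only [PySem.List.pyGetD_natCast]
  set row : List Int := mn.getD i' [] with hrow
  by_cases hc : row.getD j' 0 = 1
  · have hcolA := allZero_others_iff (fun x => (PySem.List.pyGetD mn x []).getD j' 0) mn.length i'
    have hrowA := allZero_others_iff (fun x => PySem.List.pyGetD row x 0) n j'
    have hcol : (mn.countP (fun q => q.getD j' 0 != 0) = 1)
        ↔ (∀ x < mn.length, x ≠ i' → (mn.getD x []).getD j' 0 = 0) := by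
      rw [countP_eq_one_iff mn _ [] i' him' (by show (row.getD j' 0 != 0) = true; rw [hc]; decide)]
      constructor
      · intro h x hx hxk; have := h x hx hxk; simpa using this
      · intro h x hx hxk; have := h x hx hxk; simpa using this
    rw [if_neg (not_not_intro hc)]
    by_cases hcz : ∀ x < mn.length, x ≠ i' → (mn.getD x []).getD j' 0 = 0
    · have hczA : isAllZeroA (((PySem.List.pyRange 0 (mn.length:Int) 1).filter (fun x => x ≠ (i':Int))).map
          (fun x => (PySem.List.pyGetD mn x []).getD j' 0)) = true := by
        rw [hcolA]; intro x hx hxk; simp only [PySem.List.pyGetD_natCast]; exact hcz x hx hxk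
      rw [if_neg (by rw [hczA]; decide)]
      by_cases hrz : ∀ x < n, x ≠ j' → row.getD x 0 = 0
      · have h2 : isAllZeroA (((PySem.List.pyRange 0 (n:Int) 1).filter (fun x => x ≠ (j':Int))).map
            (fun x => PySem.List.pyGetD row x 0)) = true := by
          rw [hrowA]; intro x hx hxk; simp only [PySem.List.pyGetD_natCast]; exact hrz x hx hxk
        rw [if_neg (by rw [h2]; decide)]
        have hbool : pvCond mn n row (j' : Int) = true := by
          unfold pvCond
          simp only [Int.toNat_natCast, Bool.and_eq_true, decide_eq_true_eq, beq_iff_eq]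
          exact ⟨⟨⟨⟨Int.natCast_nonneg j', by exact_mod_cast hjn'⟩, hc⟩, hrz⟩, hcol.mpr hcz⟩
        rw [if_pos hbool]
      · have h2 : isAllZeroA (((PySem.List.pyRange 0 (n:Int) 1).filter (fun x => x ≠ (j':Int))).map
            (fun x => PySem.List.pyGetD row x 0)) = false := by
          rw [Bool.eq_false_iff, Ne, hrowA]
          intro h; apply hrz; intro x hx hxk
          have := h x hx hxk; simpa using this
        rw [if_pos h2, if_neg]
        intro hb
        apply hrz
        unfold pvCond at hb
        simp only [Int.toNat_natCast] at hb
        simp only [Bool.and_eq_true, decide_eq_true_eq] at hb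
        exact hb.1.2
    · have hczA : isAllZeroA (((PySem.List.pyRange 0 (mn.length:Int) 1).filter (fun x => x ≠ (i':Int))).map
          (fun x => (PySem.List.pyGetD mn x []).getD j' 0)) = false := by
        rw [Bool.eq_false_iff, Ne, hcolA]
        intro h; apply hcz; intro x hx hxk
        have := h x hx hxk; simpa using this
      rw [if_pos hczA, if_neg]
      intro hb
      apply hcz
      apply hcol.mp
      unfold pvCond at hb
      simp only [Int.toNat_natCast] at hb
      simp only [Bool.and_eq_true, beq_iff_eq] at hb
      exact_mod_cast hb.2
  · rw [if_pos hc, if_neg]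
    intro hb
    apply hc
    unfold pvCond at hb
    simp only [Int.toNat_natCast] at hb
    simp only [Bool.and_eq_true, beq_iff_eq] at hb
    exact hb.1.1.2

-- counting identities for B
theorem countP_split (l : List Int) (p : Int → Bool) :
    l.countP p + l.countP (fun v => !(p v)) = l.length := by
  rw [List.countP_eq_length_filter, List.countP_eq_length_filter]
  exact (List.length_eq_length_filter_add p).symm

theorem nz_count (row : List Int) :
    (row.length : Int) - (row.count 0 : Int) = (row.countP (fun v => v != 0) : Int) := by
  have hs := countP_split row (fun v => v != 0)
  have h0 : row.countP (fun v => !(v != 0)) = row.count 0 := by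
    rw [List.count_eq_countP]
    apply List.countP_congr
    intro v _
    constructor
    · intro h; simpa using h
    · intro h; simpa using h
  rw [h0] at hs
  omega

-- the per-column nonzero count, as B computes it
theorem col_count (mn : List (List Int)) (j : Nat) :
    ((mn.map (fun q => q.getD j 0)).length : Int) - ((mn.map (fun q => q.getD j 0)).count 0 : Int)
      = (mn.countP (fun q => q.getD j 0 != 0) : Int) := by
  rw [nz_count, List.countP_map]
  rfl

theorem foldl_min_const (l : List (List Int)) (n : Nat) (hl : ∀ q ∈ l, q.length = n) :
    l.foldl (fun a q => min a q.length) n = n := by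
  induction l with
  | nil => rfl
  | cons h t ih =>
    have : h.length = n := hl h (by simp)
    simp only [List.foldl_cons, this, min_self]
    exact ih (fun q hq => hl q (by simp [hq]))

-- under Pre_ (rectangular, row length n) pyZipStar produces the n columns
theorem pyZipStar_rect (mn : List (List Int)) (n : Nat) (hne : mn ≠ [])
    (hl : ∀ q ∈ mn, q.length = n) :
    pyZipStar mn = (List.range n).map (fun j => mn.map (fun q => q.getD j 0)) := by
  match mn, hne with
  | r :: rs, _ =>
    have hr : r.length = n := hl r (by simp)
    have hmin : (r :: rs).foldl (fun a q => min a q.length) r.length = n := by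
      rw [hr]; exact foldl_min_const _ n hl
    simp only [pyZipStar]
    rw [hmin]

-- if the row does not have exactly one nonzero entry, A counts nothing in it
theorem countP_pvCond_zero (mn : List (List Int)) (n : Nat) (row : List Int)
    (hrlen : row.length = n) (hr : row.countP (fun v => v != 0) ≠ 1) :
    (PySem.List.pyRange 0 (n : Int) 1).countP (pvCond mn n row) = 0 := by
  rw [List.countP_eq_zero]
  intro j hj hp
  rw [PySem.List.mem_pyRange_one] at hj
  unfold pvCond at hp
  simp only [Bool.and_eq_true, decide_eq_true_eq, beq_iff_eq] at hp
  obtain ⟨⟨⟨⟨hj0, hjn⟩, hc⟩, hz⟩, -⟩ := hp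
  apply hr
  rw [countP_eq_one_iff row _ 0 j.toNat (by omega) (by rw [hc]; decide), hrlen]
  intro x hx hxk
  have := hz x hx hxk
  rw [List.getD_eq_getElem?_getD] at this
  simp [this]

-- B's per-row contribution equals A's count of successful columns in that row
theorem rowB_eq (mn : List (List Int)) (n : Nat) (row : List Int) (hrlen : row.length = n) :
    (if ((row.length : Int) - (row.count 0 : Int) == 1) = true then
      ((PySem.List.enumerate row 0).countP (fun q =>
        q.2 == 1 && PySem.List.pyGetD
            ((List.range n).map (fun j => (mn.map (fun q => q.getD j 0)).length - ((mn.map (fun q => q.getD j 0)).count 0 : Int)))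
            q.1 0 == 1) : Int)
     else 0)
    = ((PySem.List.pyRange 0 (n : Int) 1).countP (pvCond mn n row) : Int) := by
  rw [nz_count]
  by_cases hr : row.countP (fun v => v != 0) = 1
  · rw [if_pos (by rw [hr]; decide)]
    rw [PySem.List.enumerate_eq_map_pyRange (d := (0 : Int))]
    rw [List.countP_map]
    rw [show PySem.List.len row = (n : Int) from by rw [PySem.List.len_eq, hrlen]]
    congr 1
    apply List.countP_congr
    intro j hj
    rw [PySem.List.mem_pyRange_one] at hj
    obtain ⟨hj0, hjn⟩ := hj
    simp only [Function.comp]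
    rw [show j = ((j.toNat : Nat) : Int) from (Int.toNat_of_nonneg hj0).symm]
    set j' : Nat := j.toNat with hj'
    have hjn' : j' < n := by omega
    simp only [PySem.List.pyGetD_natCast]
    have hgetmap : (((List.range n).map (fun j => ((mn.map (fun q => q.getD j 0)).length : Int) - ((mn.map (fun q => q.getD j 0)).count 0 : Int))).getD j' 0)
        = ((mn.map (fun q => q.getD j' 0)).length : Int) - ((mn.map (fun q => q.getD j' 0)).count 0 : Int) := by
      rw [List.getD_eq_getElem?_getD, List.getElem?_map, List.getElem?_range hjn']
      rfl
    rw [hgetmap, col_count mn j']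
    unfold pvCond
    rw [Bool.eq_iff_iff]
    simp only [Int.toNat_natCast, Bool.and_eq_true, beq_iff_eq, decide_eq_true_eq]
    simp only [iff_true]
    constructor
    · rintro ⟨hc, hcol⟩
      refine ⟨⟨⟨⟨Int.natCast_nonneg j', by exact_mod_cast hjn'⟩, hc⟩, ?_⟩, by exact_mod_cast hcol⟩
      have := (countP_eq_one_iff row _ 0 j' (by omega) (by rw [hc]; decide)).mp hr
      rw [hrlen] at this
      intro x hx hxk
      have hx0 := this x hx hxk
      simpa using hx0
    · rintro ⟨⟨⟨-, hc⟩, -⟩, hcol⟩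
      exact ⟨hc, by exact_mod_cast hcol⟩
  · rw [if_neg (by simpa using fun h => hr (by exact_mod_cast h))]
    rw [countP_pvCond_zero mn n row hrlen hr]
    rfl

theorem cntSP_eq (mn : List (List Int)) (hne : mn ≠ [])
    (hlen : ∀ row ∈ mn, row.length = (PySem.List.pyGetD mn 0 ([] : List Int)).length) :
    cntSP mn = cntSP_alt mn := by
  unfold cntSP cntSP_alt
  simp only []
  set n : Nat := (PySem.List.pyGetD mn 0 []).length with hn
  have hA : (PySem.List.pyRange 0 (mn.length : Int) 1).foldl (fun (c : Int) (i : Int) =>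
      (PySem.List.pyRange 0 (n : Int) 1).foldl (fun (c : Int) (j : Int) =>
        if PySem.List.pyGetD (PySem.List.pyGetD mn i []) j 0 ≠ 1 then c
        else if isAllZeroA (((PySem.List.pyRange 0 (mn.length : Int) 1).filter (fun x => x ≠ i)).map
               (fun x => PySem.List.pyGetD (PySem.List.pyGetD mn x []) j 0)) = false then c
        else if isAllZeroA (((PySem.List.pyRange 0 (n : Int) 1).filter (fun x => x ≠ j)).map
               (fun x => PySem.List.pyGetD (PySem.List.pyGetD mn i []) x 0)) = false then c
        else c + 1) c) (0 : Int)
      = mn.foldl (fun (c : Int) (row : List Int) => (PySem.List.pyRange 0 (n : Int) 1).foldl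
          (fun (c : Int) (j : Int) => if pvCond mn n row j = true then c + 1 else c) c) (0 : Int) := by
    rw [← PySem.List.foldl_pyRange_zero_pyGetD' mn ([] : List Int)
        (fun (c : Int) (row : List Int) => (PySem.List.pyRange 0 (n : Int) 1).foldl
          (fun (c : Int) (j : Int) => if pvCond mn n row j = true then c + 1 else c) c) (0 : Int)]
    apply PySem.List.foldl_congr_mem
    intro c i hi
    rw [PySem.List.mem_pyRange_one] at hi
    apply PySem.List.foldl_congr_mem
    intro c' j hj
    rw [PySem.List.mem_pyRange_one] at hj
    exact cellA_eq mn n hn c' i j hi.1 hi.2 hj.1 hj.2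
  rw [hA]
  -- A as a sum of per-row counts
  have hA2 : mn.foldl (fun (c : Int) (row : List Int) => (PySem.List.pyRange 0 (n : Int) 1).foldl
          (fun (c : Int) (j : Int) => if pvCond mn n row j = true then c + 1 else c) c) (0 : Int)
      = mn.foldl (fun (c : Int) (row : List Int) =>
          c + ((PySem.List.pyRange 0 (n : Int) 1).countP (pvCond mn n row) : Int)) (0 : Int) := by
    apply PySem.List.foldl_congr_mem
    intro c row _
    rw [PySem.List.foldl_if_add_one (pvCond mn n row) _ c]
  rw [hA2]
  -- B-side
  by_cases hmem : (1 : Int) ∈ mn.map (fun row => (row.length : Int) - (row.count 0 : Int))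
  · rw [if_pos hmem]
    rw [pyZipStar_rect mn n hne (fun q hq => hlen q hq), List.map_map]
    have hzip : ∀ (l : List (List Int)),
        (l.map (fun row => (row.length : Int) - (row.count 0 : Int))).zip l
          = l.map (fun row => ((row.length : Int) - (row.count 0 : Int), row)) := by
      intro l
      induction l with
      | nil => rfl
      | cons h t ih => simp [ih]
    rw [hzip, List.foldl_map]
    apply Eq.symm
    apply PySem.List.foldl_congr_mem
    intro c row hrow
    have hsplit : (if ((((row.length : Int) - (row.count 0 : Int), row).1 == 1) = true) then
        c + ((PySem.List.enumerate ((((row.length : Int) - (row.count 0 : Int), row)).2) 0).countP (fun q =>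
              q.2 == 1 && PySem.List.pyGetD
                ((List.range n).map ((fun col => (col.length : Int) - (col.count 0 : Int)) ∘
                  (fun j => mn.map (fun q => q.getD j 0)))) q.1 0 == 1) : Int)
      else c)
        = c + (if (((row.length : Int) - (row.count 0 : Int) == 1) = true) then
            ((PySem.List.enumerate row 0).countP (fun q =>
              q.2 == 1 && PySem.List.pyGetD
                ((List.range n).map (fun j => ((mn.map (fun q => q.getD j 0)).length : Int) - ((mn.map (fun q => q.getD j 0)).count 0 : Int))) q.1 0 == 1) : Int)
          else 0) := by
      split <;> simp [Function.comp_def]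
    rw [hsplit, rowB_eq mn n row (hlen row hrow)]
  · rw [if_neg hmem]
    have hz : ∀ (c : Int) (row : List Int), row ∈ mn →
        c + ((PySem.List.pyRange 0 (n : Int) 1).countP (pvCond mn n row) : Int) = c := by
      intro c row hrow
      have hr : row.countP (fun v => v != 0) ≠ 1 := by
        intro h1
        apply hmem
        rw [List.mem_map]
        exact ⟨row, hrow, by rw [nz_count, h1]; rfl⟩
      rw [countP_pvCond_zero mn n row (hlen row hrow) hr]
      simp
    rw [PySem.List.foldl_congr_mem _ _ _ _ hz]
    exact List.foldl_fixed mn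

-- ===== VERDICT (by name: the statement is the Claim_ definition above) =====
theorem cntSP_spec : Claim_equal_cntSP := by
  intro mn _ hpre
  unfold Spec_cntSP
  exact cntSP_eq mn hpre.1 hpre.2
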